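-- pv_equiv track=rewrite | github.com/AakanshaMittal/CsvCompare | DataValidation_RBU/rbuSpace.py | find_tables
-- ===== SOURCE A (Python) =====
-- def is_blank(x):
--
--     return x is None or str(x).strip() == ""
--
-- def find_tables(grid, start_row=1):
--
--     tables = []
--
--     r = start_row
--
--     while r < len(grid):
--
--         if all(is_blank(x) for x in grid[r]):
--
--             r += 1
--
--             continue
--
--         top = r
--
--         while r < len(grid) and not all(is_blank(x) for x in grid[r]):
--
--             r += 1
--
--         tables.append((top, r - 1))
--
--         r += 1
--
--     return tables
-- ===== SOURCE B (Python) =====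
-- def is_blank(x):
--     return x is None or str(x).strip() == ""
--
-- def find_tables(grid, start_row=1):
--     # Pass 1: classify every row once into a blankness mask.
--     blank = [all(is_blank(x) for x in row) for row in grid]
--     n = len(grid)
--     # Pass 2: one linear sweep with an in-table state machine.
--     tables = []
--     in_table = False
--     top = 0
--     for r in range(start_row, n):
--         if blank[r]:
--             if in_table:
--                 tables.append((top, r - 1))
--                 in_table = False
--         elif not in_table:
--             top = r
--             in_table = True
--     if in_table:
--         tables.append((top, n - 1))
--     return tables
-- ===== Notes on version B (the rewrite author's own statement) =====
-- stated objective: alternative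
-- what changed: Replaced A's nested while-loops (an inner scan that advances past each table) by a classify-then-group design: a precomputed per-row blankness mask plus a single linear sweep driven by an in-table/top state machine with a trailing flush.
import Mathlib
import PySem

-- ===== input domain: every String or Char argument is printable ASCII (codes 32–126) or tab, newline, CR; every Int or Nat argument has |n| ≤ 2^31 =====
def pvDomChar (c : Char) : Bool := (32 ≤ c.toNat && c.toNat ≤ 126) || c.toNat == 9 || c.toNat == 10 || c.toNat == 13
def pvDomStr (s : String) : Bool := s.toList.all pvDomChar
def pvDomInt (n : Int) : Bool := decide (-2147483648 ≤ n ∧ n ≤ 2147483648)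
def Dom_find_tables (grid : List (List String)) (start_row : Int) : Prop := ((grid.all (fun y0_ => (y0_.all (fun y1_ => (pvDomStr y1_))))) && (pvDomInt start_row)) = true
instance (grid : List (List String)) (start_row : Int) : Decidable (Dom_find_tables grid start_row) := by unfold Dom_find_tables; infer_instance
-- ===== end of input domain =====

-- B replaces A's nested while-loops by a blankness mask plus one state-machine sweep (alternative decomposition, same cost).

-- ===== PORT A =====
-- is_blank(x): inputs are strings, so 'x is None' is False and str(x) is x.
def isBlank (x : String) : Bool := PySem.Str.strip x == ""

-- all(is_blank(x) for x in grid[r]); pyGet? none (IndexError, excluded by Pre_) defaulted to [].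
def rowBlankAt (grid : List (List String)) (r : Int) : Bool :=
  ((PySem.List.pyGet? grid r).getD []).all isBlank

-- inner 'while r < len(grid) and not all(...)': returns the final r
def findA_run (grid : List (List String)) (n r : Int) : Int :=
  if r < n then
    if rowBlankAt grid r = false then findA_run grid n (r + 1) else r
  else r
termination_by (n - r).toNat
decreasing_by omega

theorem findA_run_ge (grid : List (List String)) (n r : Int) : r ≤ findA_run grid n r := by
  unfold findA_run
  split
  · split
    · have := findA_run_ge grid n (r + 1); omega
    · omega
  · omega
termination_by (n - r).toNat
decreasing_by omega

-- outer while loop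
def findA_loop (grid : List (List String)) (n r : Int) (tables : List (Int × Int)) :
    List (Int × Int) :=
  if r < n then
    if rowBlankAt grid r then findA_loop grid n (r + 1) tables
    else
      let r' := findA_run grid n r
      findA_loop grid n (r' + 1) (tables ++ [(r, r' - 1)])
  else tables
termination_by (n - r).toNat
decreasing_by
  · omega
  · have h := findA_run_ge grid n r; omega

def find_tables (grid : List (List String)) (start_row : Int) : List (Int × Int) :=
  findA_loop grid (grid.length : Int) start_row []

-- ===== PORT B =====
-- blank = [all(is_blank(x) for x in row) for row in grid]
def blankMask (grid : List (List String)) : List Bool :=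
  grid.map (fun row => row.all isBlank)

-- the for-loop over range(start_row, n) with state (in_table, top, tables), then the trailing flush
def findB_sweep (blank : List Bool) (n r : Int) (inTable : Bool) (top : Int)
    (tables : List (Int × Int)) : List (Int × Int) :=
  if r < n then
    if (PySem.List.pyGet? blank r).getD true then
      if inTable then findB_sweep blank n (r + 1) false top (tables ++ [(top, r - 1)])
      else findB_sweep blank n (r + 1) false top tables
    else
      if inTable then findB_sweep blank n (r + 1) true top tables
      else findB_sweep blank n (r + 1) true r tables
  else if inTable then tables ++ [(top, n - 1)] else tables
termination_by (n - r).toNat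
decreasing_by all_goals omega

def find_tables_alt (grid : List (List String)) (start_row : Int) : List (Int × Int) :=
  findB_sweep (blankMask grid) (grid.length : Int) start_row false 0 []

-- ===== PRECONDITION & SPEC =====
-- Python A raises IndexError (grid[r] with r below -len(grid)) exactly when start_row < -len(grid)
-- and the loop body is reached; Pre_ excludes precisely those inputs.
def Pre_find_tables (grid : List (List String)) (start_row : Int) : Prop :=
  -(grid.length : Int) ≤ start_row ∨ (grid.length : Int) ≤ start_row
instance (grid : List (List String)) (start_row : Int) : Decidable (Pre_find_tables grid start_row) := by unfold Pre_find_tables; infer_instance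

def pvWitness_find_tables : List (List String) × Int := ([["a"], [""], ["b", "c"]], 0)

def Spec_find_tables (grid : List (List String)) (start_row : Int) (out : List (Int × Int)) : Prop := out = find_tables_alt grid start_row
instance (grid : List (List String)) (start_row : Int) (out : List (Int × Int)) : Decidable (Spec_find_tables grid start_row out) := by unfold Spec_find_tables; infer_instance

-- ===== CLAIM (what is proved, stated in full; the proofs are below) =====
def Claim_equal_find_tables : Prop := ∀ (grid : List (List String)) (start_row : Int), Dom_find_tables grid start_row → Pre_find_tables grid start_row → Spec_find_tables grid start_row (find_tables grid start_row)

-- ===== LEMMAS AND PROOFS =====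

theorem pyGet?_map {α β : Type} (f : α → β) (xs : List α) (i : Int) :
    PySem.List.pyGet? (xs.map f) i = (PySem.List.pyGet? xs i).map f := by
  simp [PySem.List.pyGet?, PySem.List.pyIdx?]

-- the mask lookup (defaulting IndexError to True) computes exactly A's on-the-fly row test
theorem maskAt_eq (grid : List (List String)) (r : Int) :
    ((PySem.List.pyGet? (blankMask grid) r).getD true) = rowBlankAt grid r := by
  unfold blankMask rowBlankAt
  rw [pyGet?_map]
  cases PySem.List.pyGet? grid r with
  | none => simp [isBlank]
  | some row => rfl

-- joint loop invariant: B's sweep in state inTable=false tracks A's outer loop, and in state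
-- inTable=true it tracks A's inner run followed by the append and the outer loop
theorem sweep_eq_loop (grid : List (List String)) (n : Int) :
    ∀ (k : Nat) (r top : Int) (acc : List (Int × Int)), (n - r).toNat ≤ k →
      (findB_sweep (blankMask grid) n r false top acc = findA_loop grid n r acc ∧
       (r ≤ n → findB_sweep (blankMask grid) n r true top acc
          = findA_loop grid n (findA_run grid n r + 1)
              (acc ++ [(top, findA_run grid n r - 1)]))) := by
  intro k
  induction k with
  | zero =>
    intro r top acc hk
    have hrn : ¬ r < n := by omega
    refine ⟨by rw [findB_sweep, findA_loop]; simp [hrn], fun hle => ?_⟩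
    have hr : r = n := by omega
    rw [findB_sweep, findA_run, findA_loop]
    simp [hr]
  | succ k ih =>
    intro r top acc hk
    by_cases hrn : r < n
    · have hk' : (n - (r + 1)).toNat ≤ k := by omega
      by_cases hb : rowBlankAt grid r = true
      · have hrun : findA_run grid n r = r := by
          rw [findA_run]; simp [hrn, hb]
        refine ⟨?_, fun _ => ?_⟩
        · rw [findB_sweep, findA_loop]
          simp [hrn, maskAt_eq, hb]
          exact (ih (r + 1) top acc hk').1
        · rw [findB_sweep]
          simp [hrn, maskAt_eq, hb, hrun]
          exact (ih (r + 1) top (acc ++ [(top, r - 1)]) hk').1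
      · have hb' : rowBlankAt grid r = false := by simpa using hb
        have hrun : findA_run grid n r = findA_run grid n (r + 1) := by
          rw [findA_run]; simp [hrn, hb']
        refine ⟨?_, fun _ => ?_⟩
        · rw [findB_sweep, findA_loop]
          simp [hrn, maskAt_eq, hb']
          rw [hrun]
          exact (ih (r + 1) r acc hk').2 (by omega)
        · rw [findB_sweep]
          simp [hrn, maskAt_eq, hb']
          rw [hrun]
          exact (ih (r + 1) top acc hk').2 (by omega)
    · refine ⟨by rw [findB_sweep, findA_loop]; simp [hrn], fun hle => ?_⟩
      have hr : r = n := by omega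
      rw [findB_sweep, findA_run, findA_loop]
      simp [hr]

-- ===== VERDICT (by name: the statement is the Claim_ definition above) =====
theorem find_tables_spec : Claim_equal_find_tables := by
  intro grid start_row _ _
  unfold Spec_find_tables find_tables find_tables_alt
  exact ((sweep_eq_loop grid (grid.length : Int)
    ((grid.length : Int) - start_row).toNat start_row 0 [] (by omega)).1).symm
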